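-- pv_equiv track=rewrite | github.com/OshFrosch/Billbee-GSheets-Integration | scripts/processing.py | extract_shipping
-- ===== SOURCE A (Python) =====
-- def extract_shipping(ShippingIds):
--     shipping = {
--     "ShippingId": "",
--     "Shipper": "",
--     "TrackingUrl": ""
--     }
--     for ship in ShippingIds:
--         for att in shipping:
--             if ship.get(att, None):
--                 shipping[att] = ship[att]
--     return shipping
-- ===== SOURCE B (Python) =====
-- def extract_shipping(ShippingIds):
--     return {k: next((s[k] for s in reversed(ShippingIds) if s.get(k)), "")
--             for k in ("ShippingId", "Shipper", "TrackingUrl")}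
-- ===== Notes on version B (the rewrite author's own statement) =====
-- stated objective: alternative
-- what changed: One forward pass mutating all three keys per element is replaced by a per-key backward scan (reversed with early termination) assembled by a dict comprehension over the three fixed keys.
import Mathlib
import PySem

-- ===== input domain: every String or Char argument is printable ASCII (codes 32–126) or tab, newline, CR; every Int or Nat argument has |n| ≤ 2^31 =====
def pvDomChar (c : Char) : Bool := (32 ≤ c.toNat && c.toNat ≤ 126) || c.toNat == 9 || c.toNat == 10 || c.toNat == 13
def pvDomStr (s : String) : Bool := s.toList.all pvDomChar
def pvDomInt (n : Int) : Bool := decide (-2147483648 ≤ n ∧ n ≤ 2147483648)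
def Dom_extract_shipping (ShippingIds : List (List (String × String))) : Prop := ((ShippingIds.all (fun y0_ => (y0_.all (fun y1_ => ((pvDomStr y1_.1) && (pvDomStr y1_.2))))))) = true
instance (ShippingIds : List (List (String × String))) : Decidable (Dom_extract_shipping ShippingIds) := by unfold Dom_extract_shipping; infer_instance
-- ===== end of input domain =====

-- B replaces the forward pass mutating all three keys with an independent reversed early-exit scan per key (alternative decomposition).


-- ===== PORT A =====
-- for ship in ShippingIds: for att in shipping: if ship.get(att, None): shipping[att] = ship[att]
def extract_shipping (ShippingIds : List (List (String × String))) : List (String × String) :=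
  let init : PySem.Dict String String :=
    PySem.Dict.ofList [("ShippingId", ""), ("Shipper", ""), ("TrackingUrl", "")]
  (ShippingIds.foldl (fun shipping ship =>
      shipping.keys.foldl (fun sh att =>
        match (PySem.Dict.mk ship).get? att with
        | some v => if v ≠ "" then sh.insert att v else sh
        | none => sh) shipping) init).items

-- ===== PORT B =====
-- next((s[k] for s in reversed(ShippingIds) if s.get(k)), "")
def lastTruthy (ShippingIds : List (List (String × String))) (k : String) : String :=
  (ShippingIds.reverse.findSome? (fun s =>
      match (PySem.Dict.mk s).get? k with
      | some v => if v = "" then none else some v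
      | none => none)).getD ""

def extract_shipping_alt (ShippingIds : List (List (String × String))) : List (String × String) :=
  ["ShippingId", "Shipper", "TrackingUrl"].map (fun k => (k, lastTruthy ShippingIds k))

-- ===== PRECONDITION & SPEC =====
def Spec_extract_shipping (ShippingIds : List (List (String × String))) (out : List (String × String)) : Prop := out = extract_shipping_alt ShippingIds
instance (ShippingIds : List (List (String × String))) (out : List (String × String)) : Decidable (Spec_extract_shipping ShippingIds out) := by unfold Spec_extract_shipping; infer_instance

-- ===== CLAIM (what is proved, stated in full; the proofs are below) =====
def Claim_equal_extract_shipping : Prop := ∀ (ShippingIds : List (List (String × String))), Dom_extract_shipping ShippingIds → Spec_extract_shipping ShippingIds (extract_shipping ShippingIds)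

-- ===== LEMMAS AND PROOFS =====

-- the body of A's outer loop
def stepA (shipping : PySem.Dict String String) (ship : List (String × String)) : PySem.Dict String String :=
  shipping.keys.foldl (fun sh att =>
    match (PySem.Dict.mk ship).get? att with
    | some v => if v ≠ "" then sh.insert att v else sh
    | none => sh) shipping

theorem lastTruthy_append (L : List (List (String × String))) (x : List (String × String)) (k : String) :
    lastTruthy (L ++ [x]) k =
      (match (PySem.Dict.mk x).get? k with
       | some v => if v = "" then lastTruthy L k else v
       | none => lastTruthy L k) := by
  simp only [lastTruthy, List.reverse_append, List.reverse_cons, List.reverse_nil,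
    List.nil_append, List.cons_append, List.findSome?_cons]
  cases h : (PySem.Dict.mk x).get? k with
  | none => simp
  | some v => by_cases hv : v = "" <;> simp [hv]

theorem stepA_eval (a b c : String) (x : List (String × String)) :
    stepA (PySem.Dict.mk [("ShippingId", a), ("Shipper", b), ("TrackingUrl", c)]) x =
      PySem.Dict.mk
        [("ShippingId", match (PySem.Dict.mk x).get? "ShippingId" with
                        | some v => if v = "" then a else v | none => a),
         ("Shipper",    match (PySem.Dict.mk x).get? "Shipper" with
                        | some v => if v = "" then b else v | none => b),
         ("TrackingUrl", match (PySem.Dict.mk x).get? "TrackingUrl" with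
                        | some v => if v = "" then c else v | none => c)] := by
  simp only [stepA, PySem.Dict.keys_mk, List.map, List.foldl]
  cases h1 : (PySem.Dict.mk x).get? "ShippingId" <;>
    cases h2 : (PySem.Dict.mk x).get? "Shipper" <;>
    cases h3 : (PySem.Dict.mk x).get? "TrackingUrl"
  all_goals dsimp only
  all_goals try split_ifs
  all_goals simp_all [PySem.Dict.insert, PySem.Dict.contains]

theorem foldA_eq (L : List (List (String × String))) :
    L.foldl stepA (PySem.Dict.ofList [("ShippingId", ""), ("Shipper", ""), ("TrackingUrl", "")]) =
      PySem.Dict.mk [("ShippingId", lastTruthy L "ShippingId"),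
                     ("Shipper", lastTruthy L "Shipper"),
                     ("TrackingUrl", lastTruthy L "TrackingUrl")] := by
  induction L using List.reverseRecOn with
  | nil => rfl
  | append_singleton L x ih =>
      rw [List.foldl_append, List.foldl_cons, List.foldl_nil, ih, stepA_eval,
        lastTruthy_append, lastTruthy_append, lastTruthy_append]

-- ===== VERDICT (by name: the statement is the Claim_ definition above) =====
theorem extract_shipping_spec : Claim_equal_extract_shipping := by
  intro L _
  show extract_shipping L = extract_shipping_alt L
  have : extract_shipping L = (L.foldl stepA (PySem.Dict.ofList [("ShippingId", ""), ("Shipper", ""), ("TrackingUrl", "")])).items := rfl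
  rw [this, foldA_eq]
  rfl
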